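-- pv_equiv track=rewrite | github.com/ruirui688/SLAM | tools/prepare_independent_supervision_p195.py | split_overlap
-- ===== SOURCE A (Python) =====
-- from collections import Counter, defaultdict
-- from typing import Any
--
-- def split_overlap(rows: list[dict[str, str]]) -> dict[str, Any]:
--     keys_by_split: dict[str, set[str]] = defaultdict(set)
--     samples_by_split: dict[str, set[str]] = defaultdict(set)
--     for row in rows:
--         split = row.get("split", "")
--         if row.get("physical_key"):
--             keys_by_split[split].add(row["physical_key"])
--         if row.get("sample_id"):
--             samples_by_split[split].add(row["sample_id"])
--     overlaps: dict[str, int] = {}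
--     splits = sorted(keys_by_split)
--     for i, a in enumerate(splits):
--         for b in splits[i + 1 :]:
--             overlaps[f"{a}|{b}"] = len(keys_by_split[a] & keys_by_split[b])
--     sample_overlaps: dict[str, int] = {}
--     splits = sorted(samples_by_split)
--     for i, a in enumerate(splits):
--         for b in splits[i + 1 :]:
--             sample_overlaps[f"{a}|{b}"] = len(samples_by_split[a] & samples_by_split[b])
--     return {
--         "physical_key_overlap_by_split_pair": overlaps,
--         "sample_id_overlap_by_split_pair": sample_overlaps,
--     }
-- ===== SOURCE B (Python) =====
-- from collections import Counter
--
-- def split_overlap(rows):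
--     # Inverted index + Counter: group the splits each key/sample occurs in,
--     # count each co-occurring sorted split pair once via a Counter, and read
--     # the counts back over all sorted pairs of the seen splits (zero-filled).
--     def pairs(xs):
--         if not xs:
--             return []
--         head, tail = xs[0], xs[1:]
--         return [(head, b) for b in tail] + pairs(tail)
--
--     def collect(field):
--         splits_of = {}
--         seen = set()
--         for row in rows:
--             v = row.get(field)
--             if v:
--                 sp = row.get("split", "")
--                 splits_of.setdefault(v, set()).add(sp)
--                 seen.add(sp)
--         return splits_of, seen
--
--     def counts(splits_of, seen):
--         hits = Counter(f"{a}|{b}" for sps in splits_of.values()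
--                        for a, b in pairs(sorted(sps)))
--         return {f"{a}|{b}": hits[f"{a}|{b}"] for a, b in pairs(sorted(seen))}
--
--     return {
--         "physical_key_overlap_by_split_pair": counts(*collect("physical_key")),
--         "sample_id_overlap_by_split_pair": counts(*collect("sample_id")),
--     }
-- ===== Notes on version B (the rewrite author's own statement) =====
-- stated objective: alternative
-- what changed: Instead of intersecting per-split key/sample sets for every sorted split pair (a full set intersection per pair), B inverts the index: it groups the splits each key/sample occurs in, counts each co-occurring sorted split pair once with a Counter, and reads the counts back over all sorted pairs of the seen splits (zero-filled). Pre_ excludes inputs where a contributing row's split name contains '|', on which distinct split pairs collide into one ambiguous f'{a}|{b}' dict key and A's last-pair-wins overwrite is accidental (B sums the colliding pairs).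
import Mathlib
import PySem

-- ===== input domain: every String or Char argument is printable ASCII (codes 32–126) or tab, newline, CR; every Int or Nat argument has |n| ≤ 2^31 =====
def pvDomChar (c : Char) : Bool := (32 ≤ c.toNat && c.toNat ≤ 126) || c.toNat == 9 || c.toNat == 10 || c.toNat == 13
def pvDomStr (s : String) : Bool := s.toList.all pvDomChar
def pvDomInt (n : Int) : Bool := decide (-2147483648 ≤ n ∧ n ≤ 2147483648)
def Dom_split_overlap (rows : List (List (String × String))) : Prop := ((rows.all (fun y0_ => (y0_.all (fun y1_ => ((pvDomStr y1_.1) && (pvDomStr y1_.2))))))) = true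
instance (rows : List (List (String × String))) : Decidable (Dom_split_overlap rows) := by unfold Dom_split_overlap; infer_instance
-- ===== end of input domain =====

-- B replaces A's per-pair set intersections by an inverted index with a Counter over
-- co-occurring split pairs (alternative algorithm, same results); equivalence is proved
-- for split names without '|' (see Pre_).

-- row.get(k, dflt): a Python dict row is an association list; lookup = first match.
def pvRowGet (row : List (String × String)) (k dflt : String) : String :=
  (PySem.Dict.mk row).getD k dflt

-- ===== PORT A =====
-- A's 'if row.get(c): table[split].add(row[c])' (defaultdict access; row[c] = row.get(c) there).
def pvUpdA (d : PySem.Dict String (PySem.Set String)) (idval split : String) :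
    PySem.Dict String (PySem.Set String) :=
  if idval ≠ "" then d.modify split PySem.Set.empty (fun s => PySem.Set.add s idval) else d

-- A's pair loop (written twice in the Python, for keys_by_split and samples_by_split).
def pvOverlapsOf (tbl : PySem.Dict String (PySem.Set String)) : PySem.Dict String Int :=
  let splits := PySem.List.sorted tbl.keys (fun x => x) false
  (PySem.List.enumerate splits).foldl
    (fun ov p =>
      (PySem.List.slice splits (some (p.1 + 1)) none).foldl
        (fun ov b =>
          ov.insert (p.2 ++ "|" ++ b)
            (PySem.Set.len (PySem.Set.inter (tbl.getD p.2 PySem.Set.empty)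
              (tbl.getD b PySem.Set.empty)))) ov)
    PySem.Dict.empty

def split_overlap (rows : List (List (String × String))) : List (String × List (String × Int)) :=
  let st := rows.foldl
    (fun st row =>
      (pvUpdA st.1 (pvRowGet row "physical_key" "") (pvRowGet row "split" ""),
       pvUpdA st.2 (pvRowGet row "sample_id" "") (pvRowGet row "split" "")))
    (PySem.Dict.empty, PySem.Dict.empty)
  [("physical_key_overlap_by_split_pair", (pvOverlapsOf st.1).items),
   ("sample_id_overlap_by_split_pair", (pvOverlapsOf st.2).items)]

-- ===== PORT B =====
-- Source B's pairs(xs): recursive unordered pairs of a list, in order.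
def pvPairs {α : Type} : List α → List (α × α)
  | [] => []
  | x :: xs => xs.map (fun b => (x, b)) ++ pvPairs xs

-- Source B's collect(field): one pass over rows for one field.
def pvCollect (rows : List (List (String × String))) (field : String) :
    PySem.Dict String (PySem.Set String) × PySem.Set String :=
  rows.foldl
    (fun st row =>
      let v := pvRowGet row field ""
      if v ≠ "" then
        let sp := pvRowGet row "split" ""
        (st.1.modify v PySem.Set.empty (fun s => PySem.Set.add s sp),
         PySem.Set.add st.2 sp)
      else st)
    (PySem.Dict.empty, PySem.Set.empty)

-- Source B's counts(splits_of, seen): Counter over co-occurring pairs, read back zero-filled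
-- over all sorted pairs of seen (the dict comprehension, built key by key).
def pvCounts (tbl : PySem.Dict String (PySem.Set String)) (seen : PySem.Set String) :
    List (String × Int) :=
  let hits := PySem.Dict.counter
    ((tbl.values.map (fun sps =>
        (pvPairs (PySem.List.sorted sps (fun x => x) false)).map
          (fun q => q.1 ++ "|" ++ q.2))).flatten)
  ((pvPairs (PySem.List.sorted seen (fun x => x) false)).foldl
     (fun d q => d.insert (q.1 ++ "|" ++ q.2) (hits.getD (q.1 ++ "|" ++ q.2) 0))
     PySem.Dict.empty).items

def split_overlap_alt (rows : List (List (String × String))) : List (String × List (String × Int)) :=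
  let k := pvCollect rows "physical_key"
  let s := pvCollect rows "sample_id"
  [("physical_key_overlap_by_split_pair", pvCounts k.1 k.2),
   ("sample_id_overlap_by_split_pair", pvCounts s.1 s.2)]

-- ===== PRECONDITION & SPEC =====
-- Pre_ excludes inputs where a contributing row's split name contains '|': there distinct split
-- pairs can collide into one ambiguous f"{a}|{b}" dict key and A's last-pair-wins overwrite of
-- that key is accidental (B sums the colliding pairs instead).
def Pre_split_overlap (rows : List (List (String × String))) : Prop :=
  ∀ row ∈ rows,
    (pvRowGet row "physical_key" "" ≠ "" ∨ pvRowGet row "sample_id" "" ≠ "") →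
      '|' ∉ (pvRowGet row "split" "").toList

instance (rows : List (List (String × String))) : Decidable (Pre_split_overlap rows) := by
  unfold Pre_split_overlap; infer_instance

def pvWitness_split_overlap : (List (List (String × String))) :=
  [[("split", "a"), ("physical_key", "k"), ("sample_id", "s")],
   [("split", "b"), ("physical_key", "k")]]

def Spec_split_overlap (rows : List (List (String × String))) (out : List (String × List (String × Int))) : Prop := out = split_overlap_alt rows
instance (rows : List (List (String × String))) (out : List (String × List (String × Int))) : Decidable (Spec_split_overlap rows out) := by unfold Spec_split_overlap; infer_instance

-- ===== CLAIM (what is proved, stated in full; the proofs are below) =====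
def Claim_equal_split_overlap : Prop := ∀ (rows : List (List (String × String))), Dom_split_overlap rows → Pre_split_overlap rows → Spec_split_overlap rows (split_overlap rows)

-- ===== LEMMAS AND PROOFS =====

-- B's per-row step, named for the invariant proofs.
def pvUpdB (p : PySem.Dict String (PySem.Set String) × PySem.Set String) (idval split : String) :
    PySem.Dict String (PySem.Set String) × PySem.Set String :=
  if idval ≠ "" then
    (p.1.modify idval PySem.Set.empty (fun s => PySem.Set.add s split), PySem.Set.add p.2 split)
  else p

theorem pvCollectEq (rows : List (List (String × String))) (field : String) :
    pvCollect rows field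
      = (rows.map (fun row => (pvRowGet row field "", pvRowGet row "split" ""))).foldl
          (fun q p => pvUpdB q p.1 p.2) (PySem.Dict.empty, PySem.Set.empty) := by
  simp only [pvCollect, pvUpdB, List.foldl_map]

-- key-injectivity machinery: "a|b" determines (a,b) when a, c have no '|'
theorem pvBarSplit : ∀ (xs us ys vs : List Char), '|' ∉ xs → '|' ∉ us →
    xs ++ '|' :: ys = us ++ '|' :: vs → xs = us ∧ ys = vs := by
  intro xs
  induction xs with
  | nil =>
    intro us ys vs _ hu h
    cases us with
    | nil => simpa using h
    | cons u ut =>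
      simp at h
      exact absurd (h.1 ▸ List.mem_cons_self) hu
  | cons x xt ih =>
    intro us ys vs hx hu h
    cases us with
    | nil =>
      simp at h
      exact absurd (h.1 ▸ List.mem_cons_self) hx
    | cons u ut =>
      simp at h
      obtain ⟨rfl, h2⟩ := h
      have := ih ut ys vs (fun m => hx (List.mem_cons_of_mem _ m))
        (fun m => hu (List.mem_cons_of_mem _ m)) h2
      simp [this.1, this.2]

theorem pvKeyInj (a b c d : String) (ha : '|' ∉ a.toList) (hc : '|' ∉ c.toList)
    (h : a ++ "|" ++ b = c ++ "|" ++ d) : a = c ∧ b = d := by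
  have h' : a.toList ++ '|' :: b.toList = c.toList ++ '|' :: d.toList := by
    have := congrArg String.toList h
    simpa [String.toList_append] using this
  obtain ⟨h1, h2⟩ := pvBarSplit _ _ _ _ ha hc h'
  exact ⟨String.toList_inj.mp h1, String.toList_inj.mp h2⟩

theorem pvMemPairs {α : Type} [LinearOrder α] (l : List α) (hl : l.Pairwise (· < ·)) (q : α × α) :
    q ∈ pvPairs l ↔ q.1 ∈ l ∧ q.2 ∈ l ∧ q.1 < q.2 := by
  induction l with
  | nil => simp [pvPairs]
  | cons x xs ih =>
    have hx : ∀ y ∈ xs, x < y := by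
      intro y hy; exact (List.pairwise_cons.mp hl).1 y hy
    have ih' := ih (List.pairwise_cons.mp hl).2
    constructor
    · intro h
      rcases List.mem_append.mp h with h | h
      · obtain ⟨b, hb, rfl⟩ := List.mem_map.mp h
        exact ⟨by simp, by simp [hb], hx b hb⟩
      · obtain ⟨h1, h2, h3⟩ := ih'.mp h
        exact ⟨List.mem_cons_of_mem _ h1, List.mem_cons_of_mem _ h2, h3⟩
    · rintro ⟨h1, h2, h3⟩
      rcases List.mem_cons.mp h1 with rfl | h1
      · rcases List.mem_cons.mp h2 with h2' | h2'
        · exact absurd (h2' ▸ h3) (lt_irrefl _)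
        · exact List.mem_append.mpr (Or.inl (List.mem_map.mpr ⟨q.2, h2', rfl⟩))
      · rcases List.mem_cons.mp h2 with h2' | h2'
        · have hl1 := hx q.1 h1
          rw [h2'] at h3
          exact absurd (h3.trans hl1) (lt_irrefl _)
        · exact List.mem_append.mpr (Or.inr (ih'.mpr ⟨h1, h2', h3⟩))

theorem pvNodupPairs {α : Type} [LinearOrder α] (l : List α) (hl : l.Pairwise (· < ·)) :
    (pvPairs l).Nodup := by
  induction l with
  | nil => simp [pvPairs]
  | cons x xs ih =>
    have hx : ∀ y ∈ xs, x < y := fun y hy => (List.pairwise_cons.mp hl).1 y hy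
    have htl := (List.pairwise_cons.mp hl).2
    have hnd : xs.Nodup := htl.imp (fun h => ne_of_lt h)
    refine List.Nodup.append (hnd.map ?_) (ih htl) ?_
    · intro a b h; simpa using congrArg Prod.snd h
    · intro q hq hq'
      obtain ⟨b, hb, rfl⟩ := List.mem_map.mp hq
      have := ((pvMemPairs xs htl _).mp hq').1
      simp at this
      exact absurd (hx x this) (lt_irrefl x)

-- A's enumerate/slice double loop is a fold over pvPairs
theorem pvDFoldAux {α β : Type} (xs : List α) : ∀ (pre : List α) (g : β → α → α → β) (init : β),
    (PySem.List.enumerate xs (pre.length : Int)).foldl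
      (fun acc p => (PySem.List.slice (pre ++ xs) (some (p.1 + 1)) none).foldl
        (fun acc b => g acc p.2 b) acc) init
    = (pvPairs xs).foldl (fun acc q => g acc q.1 q.2) init := by
  induction xs with
  | nil => intro pre g init; simp [PySem.List.enumerate, pvPairs]
  | cons x xt ih =>
    intro pre g init
    rw [PySem.List.enumerate_cons]
    rw [List.foldl_cons]
    have hslice : PySem.List.slice (pre ++ x :: xt) (some ((pre.length : Int) + 1)) none = xt := by
      rw [PySem.List.slice_from _ (by positivity)]
      have : ((pre.length : Int) + 1).toNat = (pre ++ [x]).length := by simp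
      rw [this]
      have : pre ++ x :: xt = (pre ++ [x]) ++ xt := by simp
      rw [this, List.drop_left]
    rw [hslice]
    have hpre : pre ++ x :: xt = (pre ++ [x]) ++ xt := by simp
    have hlen : (pre.length : Int) + 1 = ((pre ++ [x]).length : Int) := by simp
    rw [hlen, hpre, ih (pre ++ [x])]
    simp only [pvPairs, List.foldl_append, List.foldl_map]

theorem pvDFold {α β : Type} (l : List α) (g : β → α → α → β) (init : β) :
    (PySem.List.enumerate l).foldl
      (fun acc p => (PySem.List.slice l (some (p.1 + 1)) none).foldl
        (fun acc b => g acc p.2 b) acc) init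
    = (pvPairs l).foldl (fun acc q => g acc q.1 q.2) init := by
  have := pvDFoldAux l [] g init
  simpa using this

theorem pvCountBridge (Ka Kb keysT : List String) (hKa : Ka.Nodup) (hT : keysT.Nodup)
    (hsub : ∀ x ∈ Ka, x ∈ keysT) :
    List.countP (fun x => decide (x ∈ Ka) && decide (x ∈ Kb)) keysT
      = List.countP (fun x => decide (x ∈ Kb)) Ka := by
  rw [List.countP_eq_length_filter, List.countP_eq_length_filter]
  have h1 : (keysT.filter (fun x => decide (x ∈ Ka) && decide (x ∈ Kb))).Nodup :=
    hT.filter _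
  have h2 : (Ka.filter (fun x => decide (x ∈ Kb))).Nodup := hKa.filter _
  refine List.Perm.length_eq ((List.perm_ext_iff_of_nodup h1 h2).mpr ?_)
  intro a
  simp only [List.mem_filter, Bool.and_eq_true, decide_eq_true_eq]
  constructor
  · rintro ⟨_, ha, hb⟩; exact ⟨ha, hb⟩
  · rintro ⟨ha, hb⟩; exact ⟨hsub a ha, ha, hb⟩

-- joint invariant of A's split→ids table and B's id→splits table + seen-splits set
def pvInv (K T : PySem.Dict String (PySem.Set String)) (seen : PySem.Set String) : Prop :=
  K.keys = seen ∧ seen.Nodup ∧ T.keys.Nodup ∧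
  (∀ a k, k ∈ K.getD a PySem.Set.empty ↔ a ∈ T.getD k PySem.Set.empty) ∧
  (∀ a, (K.getD a PySem.Set.empty).Nodup) ∧
  (∀ k, (T.getD k PySem.Set.empty).Nodup) ∧
  (∀ a ∈ seen, '|' ∉ a.toList) ∧
  (∀ k a, a ∈ T.getD k PySem.Set.empty → a ∈ seen)

theorem pvInvStep (K T : PySem.Dict String (PySem.Set String)) (seen : PySem.Set String)
    (idval split : String) (hinv : pvInv K T seen)
    (hbar : idval ≠ "" → '|' ∉ split.toList) :
    pvInv (pvUpdA K idval split) (pvUpdB (T, seen) idval split).1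
      (pvUpdB (T, seen) idval split).2 := by
  obtain ⟨hkeys, hseen, hTnd, hmem, hKnd, hTvnd, hnb, hsub⟩ := hinv
  by_cases hid : idval = ""
  · simp [pvUpdA, pvUpdB, hid]
    exact ⟨hkeys, hseen, hTnd, hmem, hKnd, hTvnd, hnb, hsub⟩
  · have hbar' := hbar hid
    simp only [pvUpdA, pvUpdB, hid, ne_eq, not_false_eq_true, if_true,
      PySem.Dict.modify]
    refine ⟨?_, ?_, ?_, ?_, ?_, ?_, ?_, ?_⟩
    · -- keys
      by_cases hc : K.contains split = true
      · have hm : split ∈ seen := hkeys ▸ (PySem.Dict.contains_iff_mem_keys K split).mp hc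
        rw [PySem.Set.add_of_mem hm, PySem.Dict.keys_insert_of_contains _ _ hc, hkeys]
      · have hc' : K.contains split = false := by simpa using hc
        have hm : split ∉ seen :=
          fun h => hc ((PySem.Dict.contains_iff_mem_keys K split).mpr (hkeys ▸ h))
        rw [PySem.Set.add_of_not_mem hm,
          PySem.Dict.keys_insert_of_not_contains _ _ hc', hkeys]
    · exact PySem.Set.nodup_add seen split hseen
    · exact PySem.Dict.nodup_keys_insert T idval _ hTnd
    · intro a k
      rw [PySem.Dict.getD_insert, PySem.Dict.getD_insert]
      by_cases has : a = split <;> by_cases hki : k = idval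
      · rw [if_pos has, if_pos hki, PySem.Set.mem_add, PySem.Set.mem_add]
        simp [has, hki]
      · rw [if_pos has, if_neg hki, PySem.Set.mem_add, has]
        simp only [hki, or_false]
        exact hmem split k
      · rw [if_neg has, if_pos hki, PySem.Set.mem_add, hki]
        simp only [has, or_false]
        exact hmem a idval
      · rw [if_neg has, if_neg hki]
        exact hmem a k
    · intro a
      rw [PySem.Dict.getD_insert]
      by_cases has : a = split <;> simp [has]
      · exact PySem.Set.nodup_add _ _ (hKnd split)
      · exact hKnd a
    · intro k
      rw [PySem.Dict.getD_insert]
      by_cases hki : k = idval <;> simp [hki]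
      · exact PySem.Set.nodup_add _ _ (hTvnd idval)
      · exact hTvnd k
    · intro a ha
      rcases (PySem.Set.mem_add seen split a).mp ha with h | rfl
      · exact hnb a h
      · exact hbar'
    · intro k a ha
      rw [PySem.Dict.getD_insert] at ha
      by_cases hki : k = idval
      · rw [if_pos hki] at ha
        rcases (PySem.Set.mem_add _ _ _).mp ha with h | h
        · exact (PySem.Set.mem_add seen split a).mpr (Or.inl (hsub idval a h))
        · exact (PySem.Set.mem_add seen split a).mpr (Or.inr h)
      · rw [if_neg hki] at ha
        exact (PySem.Set.mem_add seen split a).mpr (Or.inl (hsub k a ha))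

theorem pvInvInit : pvInv PySem.Dict.empty PySem.Dict.empty PySem.Set.empty := by
  refine ⟨?_, ?_, ?_, ?_, ?_, ?_, ?_, ?_⟩ <;>
    simp [PySem.Dict.keys_empty, PySem.Dict.getD_empty, PySem.Set.empty]

theorem pvInvFold (ps : List (String × String)) :
    ∀ (K : PySem.Dict String (PySem.Set String))
      (q : PySem.Dict String (PySem.Set String) × PySem.Set String),
      pvInv K q.1 q.2 → (∀ p ∈ ps, p.1 ≠ "" → '|' ∉ p.2.toList) →
      pvInv (ps.foldl (fun d p => pvUpdA d p.1 p.2) K)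
        (ps.foldl (fun q p => pvUpdB q p.1 p.2) q).1
        (ps.foldl (fun q p => pvUpdB q p.1 p.2) q).2 := by
  induction ps with
  | nil => intro K q h _; exact h
  | cons p pt ih =>
    intro K q h hbar
    simp only [List.foldl_cons]
    refine ih _ _ ?_ (fun p hp hne => hbar p (List.mem_cons_of_mem _ hp) hne)
    have := pvInvStep K q.1 q.2 p.1 p.2 h (hbar p List.mem_cons_self)
    simpa using this

def pvKey (q : String × String) : String := q.1 ++ "|" ++ q.2

theorem pvSortedLt (s : List String) (h : s.Nodup) :
    (PySem.List.sorted s (fun x => x) false).Pairwise (· < ·) := by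
  have hle := PySem.List.sorted_pairwise s (fun x => x)
  have hnd : (PySem.List.sorted s (fun x => x) false).Nodup :=
    (PySem.List.sorted_perm s (fun x => x) false).nodup_iff.mpr h
  exact (hle.and hnd).imp (fun h => lt_of_le_of_ne h.1 h.2)

theorem pvMemMapKey (l : List String) (hnb : ∀ x ∈ l, '|' ∉ x.toList)
    (hlt : l.Pairwise (· < ·)) (q : String × String)
    (h1 : '|' ∉ q.1.toList) (hlq : q.1 < q.2) :
    pvKey q ∈ (pvPairs l).map pvKey ↔ (q.1 ∈ l ∧ q.2 ∈ l) := by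
  constructor
  · intro h
    obtain ⟨r, hr, hkr⟩ := List.mem_map.mp h
    obtain ⟨hr1, hr2, _⟩ := (pvMemPairs l hlt r).mp hr
    obtain ⟨e1, e2⟩ := pvKeyInj r.1 r.2 q.1 q.2 (hnb r.1 hr1) h1 hkr
    exact ⟨e1 ▸ hr1, e2 ▸ hr2⟩
  · rintro ⟨ha, hb⟩
    exact List.mem_map.mpr ⟨q, (pvMemPairs l hlt q).mpr ⟨ha, hb, hlq⟩, rfl⟩

theorem pvPairsKeyNodup (l : List String) (hlt : l.Pairwise (· < ·))
    (hnb : ∀ x ∈ l, '|' ∉ x.toList) : ((pvPairs l).map pvKey).Nodup := by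
  refine (pvNodupPairs l hlt).map_on ?_
  intro r hr r' hr' hk
  obtain ⟨hr1, _, _⟩ := (pvMemPairs l hlt r).mp hr
  obtain ⟨hr1', _, _⟩ := (pvMemPairs l hlt r').mp hr'
  obtain ⟨e1, e2⟩ := pvKeyInj r.1 r.2 r'.1 r'.2 (hnb _ hr1) (hnb _ hr1') hk
  exact Prod.ext e1 e2

theorem pvCountFlat (vals : List (PySem.Set String))
    (hvnd : ∀ sps ∈ vals, sps.Nodup)
    (hvnb : ∀ sps ∈ vals, ∀ x ∈ sps, '|' ∉ x.toList)
    (q : String × String) (h1 : '|' ∉ q.1.toList) (hlq : q.1 < q.2) :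
    List.count (pvKey q)
      ((vals.map (fun sps =>
        (pvPairs (PySem.List.sorted sps (fun x => x) false)).map pvKey)).flatten)
      = List.countP (fun sps => decide (q.1 ∈ sps) && decide (q.2 ∈ sps)) vals := by
  induction vals with
  | nil => simp
  | cons sps vt ih =>
    simp only [List.map_cons, List.flatten_cons, List.count_append, List.countP_cons]
    rw [ih (fun s hs => hvnd s (List.mem_cons_of_mem _ hs))
        (fun s hs => hvnb s (List.mem_cons_of_mem _ hs))]
    have hnd := hvnd sps List.mem_cons_self
    have hnb := hvnb sps List.mem_cons_self
    have hlt := pvSortedLt sps hnd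
    have hnb' : ∀ x ∈ PySem.List.sorted sps (fun x => x) false, '|' ∉ x.toList :=
      fun x hx => hnb x ((PySem.List.mem_sorted sps _ false x).mp hx)
    have hchunk : List.count (pvKey q)
        ((pvPairs (PySem.List.sorted sps (fun x => x) false)).map pvKey)
        = if q.1 ∈ sps ∧ q.2 ∈ sps then 1 else 0 := by
      by_cases hin : q.1 ∈ sps ∧ q.2 ∈ sps
      · rw [if_pos hin]
        refine List.count_eq_one_of_mem (pvPairsKeyNodup _ hlt hnb') ?_
        exact (pvMemMapKey _ hnb' hlt q h1 hlq).mpr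
          ⟨(PySem.List.mem_sorted sps _ false q.1).mpr hin.1,
           (PySem.List.mem_sorted sps _ false q.2).mpr hin.2⟩
      · rw [if_neg hin]
        refine List.count_eq_zero_of_not_mem ?_
        intro hmem'
        obtain ⟨ha, hb⟩ := (pvMemMapKey _ hnb' hlt q h1 hlq).mp hmem'
        exact hin ⟨(PySem.List.mem_sorted sps _ false q.1).mp ha,
          (PySem.List.mem_sorted sps _ false q.2).mp hb⟩
    rw [hchunk]
    by_cases hin : q.1 ∈ sps ∧ q.2 ∈ sps
    · have ht : (decide (q.1 ∈ sps) && decide (q.2 ∈ sps)) = true := by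
        simp [hin.1, hin.2]
      rw [if_pos hin, ht]
      simp
      omega
    · have hbool : (decide (q.1 ∈ sps) && decide (q.2 ∈ sps)) = false := by
        simp only [Bool.and_eq_false_iff, decide_eq_false_iff_not]
        by_cases hq1 : q.1 ∈ sps
        · exact Or.inr (fun hq2 => hin ⟨hq1, hq2⟩)
        · exact Or.inl hq1
      rw [if_neg hin, hbool]
      simp

theorem pvOverlapsEq (K T : PySem.Dict String (PySem.Set String)) (seen : PySem.Set String)
    (hinv : pvInv K T seen) :
    (pvOverlapsOf K).items = pvCounts T seen := by
  obtain ⟨hkeys, hseen, hTnd, hmem, hKnd, hTvnd, hnb, hsub⟩ := hinv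
  have hL := pvSortedLt seen hseen
  set L := PySem.List.sorted seen (fun x => x) false with hLdef
  have hLnb : ∀ x ∈ L, '|' ∉ x.toList :=
    fun x hx => hnb x ((PySem.List.mem_sorted seen _ false x).mp hx)
  have hmapnd : ((pvPairs L).map pvKey).Nodup := pvPairsKeyNodup L hL hLnb
  -- A side
  have hKL : PySem.List.sorted K.keys (fun x => x) false = L := by rw [hkeys]
  have hA : (pvOverlapsOf K).items = (pvPairs L).map (fun q => (pvKey q,
      PySem.Set.len (PySem.Set.inter (K.getD q.1 PySem.Set.empty) (K.getD q.2 PySem.Set.empty)))) := by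
    simp only [pvOverlapsOf, hKL]
    rw [pvDFold L (fun ov a b => ov.insert (a ++ "|" ++ b)
      (PySem.Set.len (PySem.Set.inter (K.getD a PySem.Set.empty) (K.getD b PySem.Set.empty))))
      PySem.Dict.empty]
    rw [PySem.Dict.items_foldl_insert_fresh (pvPairs L) (fun q => q.1 ++ "|" ++ q.2)
      (fun q => PySem.Set.len (PySem.Set.inter (K.getD q.1 PySem.Set.empty) (K.getD q.2 PySem.Set.empty)))
      PySem.Dict.empty (fun a _ => PySem.Dict.contains_empty _) (by exact hmapnd)]
    rfl
  -- B side: the Counter's input stream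
  set allInc := (T.values.map (fun sps =>
      (pvPairs (PySem.List.sorted sps (fun x => x) false)).map pvKey)).flatten with hIncdef
  have hvals : T.values = T.keys.map (fun k0 => T.getD k0 PySem.Set.empty) :=
    PySem.Dict.values_eq_map_keys T hTnd PySem.Set.empty
  have hvnd : ∀ sps ∈ T.values, sps.Nodup := by
    intro sps hs
    rw [hvals] at hs
    obtain ⟨k0, _, rfl⟩ := List.mem_map.mp hs
    exact hTvnd k0
  have hvsub : ∀ sps ∈ T.values, ∀ x ∈ sps, x ∈ seen := by
    intro sps hs
    rw [hvals] at hs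
    obtain ⟨k0, _, rfl⟩ := List.mem_map.mp hs
    exact fun x hx => hsub k0 x hx
  have hvnb : ∀ sps ∈ T.values, ∀ x ∈ sps, '|' ∉ x.toList :=
    fun sps hs x hx => hnb x (hvsub sps hs x hx)
  have hB : pvCounts T seen = (pvPairs L).map (fun q => (pvKey q,
      (PySem.Dict.counter allInc).getD (pvKey q) 0)) := by
    simp only [pvCounts, ← hLdef, show (fun q : String × String => q.1 ++ "|" ++ q.2) = pvKey from rfl, ← hIncdef]
    rw [PySem.Dict.items_foldl_insert_fresh (pvPairs L) (fun q => q.1 ++ "|" ++ q.2)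
      (fun q => (PySem.Dict.counter allInc).getD (q.1 ++ "|" ++ q.2) 0)
      PySem.Dict.empty (fun a _ => PySem.Dict.contains_empty _) (by exact hmapnd)]
    rfl
  rw [hA, hB]
  refine List.map_congr_left ?_
  intro q hq
  obtain ⟨hq1, hq2, hq3⟩ := (pvMemPairs L hL q).mp hq
  have h1 : '|' ∉ q.1.toList := hLnb _ hq1
  rw [PySem.Dict.getD_counter, hIncdef, pvCountFlat T.values hvnd hvnb q h1 hq3]
  -- len (inter Ka Kb) = countP over values
  have hstep2 : List.countP (fun sps => decide (q.1 ∈ sps) && decide (q.2 ∈ sps)) T.values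
      = List.countP (fun x => decide (x ∈ K.getD q.2 PySem.Set.empty)) (K.getD q.1 PySem.Set.empty) := by
    rw [hvals, List.countP_map]
    have hcong : List.countP
        ((fun sps => decide (q.1 ∈ sps) && decide (q.2 ∈ sps)) ∘
          (fun k0 => T.getD k0 PySem.Set.empty)) T.keys
        = List.countP (fun k0 => decide (k0 ∈ K.getD q.1 PySem.Set.empty)
            && decide (k0 ∈ K.getD q.2 PySem.Set.empty)) T.keys := by
      refine List.countP_congr ?_
      intro k0 _
      simp only [Function.comp, Bool.and_eq_true, decide_eq_true_eq]
      rw [← hmem q.1 k0, ← hmem q.2 k0]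
    rw [hcong]
    refine pvCountBridge _ _ _ (hKnd q.1) hTnd ?_
    intro x hx
    have hx' : q.1 ∈ T.getD x PySem.Set.empty := (hmem q.1 x).mp hx
    by_cases hc : T.contains x = true
    · exact (PySem.Dict.contains_iff_mem_keys T x).mp hc
    · exfalso
      have : T.getD x PySem.Set.empty = PySem.Set.empty :=
        PySem.Dict.getD_of_not_contains T _ (by simpa using hc)
      rw [this] at hx'
      simp [PySem.Set.empty] at hx'
  rw [hstep2]
  simp only [PySem.Set.len, PySem.Set.inter]
  rw [List.countP_eq_length_filter]
  have hpred : (fun x => (K.getD q.2 PySem.Set.empty).contains x)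
      = (fun x => decide (x ∈ K.getD q.2 PySem.Set.empty)) := by
    funext x
    simp [PySem.Set.contains_eq_listContains]
  rw [hpred]

theorem pvCategoryEq (rows : List (List (String × String))) (field : String)
    (hbar : ∀ row ∈ rows, pvRowGet row field "" ≠ "" → '|' ∉ (pvRowGet row "split" "").toList) :
    (pvOverlapsOf ((rows.map (fun row => (pvRowGet row field "", pvRowGet row "split" ""))).foldl
        (fun d p => pvUpdA d p.1 p.2) PySem.Dict.empty)).items
      = pvCounts (pvCollect rows field).1 (pvCollect rows field).2 := by
  rw [pvCollectEq]
  set ps := rows.map (fun row => (pvRowGet row field "", pvRowGet row "split" "")) with hps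
  have hbar' : ∀ p ∈ ps, p.1 ≠ "" → '|' ∉ p.2.toList := by
    rintro p hp hne
    obtain ⟨row, hrow, rfl⟩ := List.mem_map.mp hp
    exact hbar row hrow hne
  have := pvInvFold ps PySem.Dict.empty (PySem.Dict.empty, PySem.Set.empty) pvInvInit hbar'
  exact pvOverlapsEq _ _ _ this

-- ===== VERDICT (by name: the statement is the Claim_ definition above) =====
theorem split_overlap_spec : Claim_equal_split_overlap := by
  intro rows _dom hpre
  unfold Spec_split_overlap
  show split_overlap rows = split_overlap_alt rows
  simp only [split_overlap, split_overlap_alt]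
  rw [PySem.List.foldl_prod_mk
        (fun d row => pvUpdA d (pvRowGet row "physical_key" "") (pvRowGet row "split" ""))
        (fun d row => pvUpdA d (pvRowGet row "sample_id" "") (pvRowGet row "split" ""))
        rows PySem.Dict.empty PySem.Dict.empty]
  have h1 := pvCategoryEq rows "physical_key"
    (fun row hrow hne => hpre row hrow (Or.inl hne))
  have h2 := pvCategoryEq rows "sample_id"
    (fun row hrow hne => hpre row hrow (Or.inr hne))
  rw [List.foldl_map] at h1 h2
  rw [h1, h2]
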